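-- pv_equiv track=rewrite | github.com/joukerodenhuis/adventofcode | AOC20158.py | strenc
-- ===== SOURCE A (Python) =====
-- def strenc(list):
--     enclist = ["\\", "\""]
--     for line in list[0]:
--         line.strip(" \n")
--         newline = ""
--         for i,letter in enumerate(line):
--             match letter:
--                 case letter if letter in enclist:
--                     newline = newline + "\\" + letter
--                 case _:
--                     newline = newline + letter
--         newline = '"' + newline + '"'
--         list[1]["enc"] += len(newline) - 1
--     return list
-- ===== SOURCE B (Python) =====
-- def strenc(list):
--     for line in list[0]:
--         list[1]["enc"] += 1 + len(line) + line.count('\\') + line.count('"')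
--     return list
-- ===== Notes on version B (the rewrite author's own statement) =====
-- stated objective: simpler
-- what changed: The inner character loop that builds the escaped string and then measures it is replaced by a closed-form arithmetic count per line (1 + len + count of backslashes + count of quotes), so no intermediate string is constructed.
import Mathlib
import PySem

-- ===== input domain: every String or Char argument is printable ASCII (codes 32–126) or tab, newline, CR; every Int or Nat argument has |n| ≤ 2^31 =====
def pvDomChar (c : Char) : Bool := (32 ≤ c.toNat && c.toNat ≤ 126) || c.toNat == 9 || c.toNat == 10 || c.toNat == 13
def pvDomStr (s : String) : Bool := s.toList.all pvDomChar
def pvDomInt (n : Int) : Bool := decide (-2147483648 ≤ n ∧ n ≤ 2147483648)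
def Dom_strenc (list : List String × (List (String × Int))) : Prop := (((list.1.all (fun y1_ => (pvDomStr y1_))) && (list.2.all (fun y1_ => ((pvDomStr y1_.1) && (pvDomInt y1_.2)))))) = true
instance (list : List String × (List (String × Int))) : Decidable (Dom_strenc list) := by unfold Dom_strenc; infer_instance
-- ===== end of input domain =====

-- B replaces A's inner character loop (building the escaped string and measuring it) by a
-- closed-form arithmetic count per line; both mutate the dict in place in Python, the
-- equivalence proved here is about the returned value.

-- the Python 'd["enc"] += δ' on the association list: add δ to the first "enc" entry
-- (if the key is absent Python raises KeyError; such inputs are outside Pre_strenc)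
def dictAddEnc : List (String × Int) → Int → List (String × Int)
  | [], _ => []
  | (k, v) :: rest, δ => if k == "enc" then (k, v + δ) :: rest else (k, v) :: dictAddEnc rest δ

-- ===== PORT A =====
def strenc (list : List String × (List (String × Int))) : List String × (List (String × Int)) :=
  let enclist : List String := ["\\", "\""]
  (list.1,
   list.1.foldl (fun d line =>
     let _ := PySem.Str.stripChars line " \n"   -- line.strip(" \n"): result discarded, as in A
     let newline :=
       line.toList.foldl (fun nl letter =>
         if String.singleton letter ∈ enclist then nl ++ "\\" ++ String.singleton letter
         else nl ++ String.singleton letter) ""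
     let newline := "\"" ++ newline ++ "\""
     dictAddEnc d (PySem.Str.len newline - 1)) list.2)

-- ===== PORT B =====
def strenc_alt (list : List String × (List (String × Int))) : List String × (List (String × Int)) :=
  (list.1,
   list.1.foldl (fun d line =>
     dictAddEnc d (1 + PySem.Str.len line + (PySem.Str.count line "\\" : Int)
                     + (PySem.Str.count line "\"" : Int))) list.2)

-- ===== PRECONDITION & SPEC =====
-- Pre_ excludes exactly the inputs on which A (and B) raise KeyError: a nonempty line list
-- with no "enc" key in the dict.
def Pre_strenc (list : List String × (List (String × Int))) : Prop :=
  "enc" ∈ list.2.map Prod.fst ∨ list.1 = []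
instance (list : List String × (List (String × Int))) : Decidable (Pre_strenc list) := by
  unfold Pre_strenc; infer_instance

def pvWitness_strenc : (List String × (List (String × Int))) :=
  (["ab\\", "\"x\""], [("enc", 5), ("z", 1)])

def Spec_strenc (list : List String × (List (String × Int))) (out : List String × (List (String × Int))) : Prop := out = strenc_alt list
instance (list : List String × (List (String × Int))) (out : List String × (List (String × Int))) : Decidable (Spec_strenc list out) := by unfold Spec_strenc; infer_instance

-- ===== CLAIM (what is proved, stated in full; the proofs are below) =====
def Claim_equal_strenc : Prop := ∀ (list : List String × (List (String × Int))), Dom_strenc list → Pre_strenc list → Spec_strenc list (strenc list)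

-- ===== LEMMAS AND PROOFS =====

-- counting a one-character pattern is counting that character
theorem count_go_singleton (c : Char) : ∀ (fuel : Nat) (l : List Char) (acc : Nat),
    l.length ≤ fuel → PySem.Chars.count.go [c] fuel l acc = acc + l.count c := by
  intro fuel
  induction fuel with
  | zero =>
    intro l acc h
    have : l = [] := List.length_eq_zero_iff.mp (Nat.le_zero.mp h)
    subst this
    simp [PySem.Chars.count.go]
  | succ n ih =>
    intro l acc h
    cases l with
    | nil => simp [PySem.Chars.count.go]
    | cons x t =>
      simp only [PySem.Chars.count.go]
      have ht : t.length ≤ n := by simpa using h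
      by_cases hx : x = c
      · subst hx
        simp [List.isPrefixOf, ih _ _ ht]
        omega
      · have : ([c].isPrefixOf (x :: t)) = false := by
          simp [List.isPrefixOf]; exact fun h' => hx h'.symm
        simp [this, ih _ _ ht, hx]

theorem chars_count_singleton (l : List Char) (c : Char) :
    PySem.Chars.count l [c] = l.count c := by
  simp [PySem.Chars.count, count_go_singleton c l.length l 0 (le_refl _)]

theorem singleton_mem_enclist (c : Char) :
    (String.singleton c ∈ (["\\", "\""] : List String)) ↔ (c = '\\' ∨ c = '"') := by
  constructor
  · intro h
    rcases List.mem_cons.mp h with h | h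
    · left; have := congrArg String.toList h; simpa using this
    · right
      rcases List.mem_cons.mp h with h | h
      · have := congrArg String.toList h; simpa using this
      · simp at h
  · rintro (rfl | rfl)
    · exact List.mem_cons_self
    · exact List.mem_cons_of_mem _ List.mem_cons_self

-- length of the escaped string A builds for one line
theorem escape_fold_length : ∀ (cs : List Char) (s : String),
    (cs.foldl (fun nl letter =>
       if String.singleton letter ∈ (["\\", "\""] : List String) then nl ++ "\\" ++ String.singleton letter
       else nl ++ String.singleton letter) s).toList.length
      = s.toList.length + cs.length + cs.count '\\' + cs.count '"' := by
  intro cs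
  induction cs with
  | nil => intro s; simp
  | cons c t ih =>
    intro s
    simp only [List.foldl_cons]
    by_cases hc : String.singleton c ∈ (["\\", "\""] : List String)
    · rw [if_pos hc, ih]
      rcases (singleton_mem_enclist c).mp hc with rfl | rfl <;>
        simp [String.toList_append] <;> omega
    · rw [if_neg hc, ih]
      have hnot := (singleton_mem_enclist c).not.mp hc
      rw [not_or] at hnot
      simp [hnot.1, hnot.2]
      omega

-- the per-line increment computed by A equals B's closed form
theorem delta_eq (line : String) :
    PySem.Str.len ("\"" ++ (line.toList.foldl (fun nl letter =>
        if String.singleton letter ∈ (["\\", "\""] : List String) then nl ++ "\\" ++ String.singleton letter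
        else nl ++ String.singleton letter) "") ++ "\"") - 1
      = 1 + PySem.Str.len line + (PySem.Str.count line "\\" : Int) + (PySem.Str.count line "\"" : Int) := by
  have h : (line.toList.foldl (fun nl letter =>
        if String.singleton letter ∈ (["\\", "\""] : List String) then nl ++ "\\" ++ String.singleton letter
        else nl ++ String.singleton letter) "").toList.length
      = line.toList.length + line.toList.count '\\' + line.toList.count '"' := by
    simpa using escape_fold_length line.toList ""
  have hc1 : PySem.Str.count line "\\" = line.toList.count '\\' := by
    rw [PySem.Str.count_eq]
    exact chars_count_singleton line.toList '\\'
  have hc2 : PySem.Str.count line "\"" = line.toList.count '"' := by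
    rw [PySem.Str.count_eq]
    exact chars_count_singleton line.toList '"'
  rw [PySem.Str.len_eq, PySem.Str.len_eq, hc1, hc2, String.toList_append, String.toList_append,
    List.length_append, List.length_append, h]
  have hl : line.toList.length = line.length := by simp
  rw [hl]
  push_cast [List.length_singleton]
  ring

-- the two folds agree line by line
theorem folds_eq : ∀ (lines : List String) (d : List (String × Int)),
    lines.foldl (fun d line =>
      let _ := PySem.Str.stripChars line " \n"
      let newline :=
        line.toList.foldl (fun nl letter =>
          if String.singleton letter ∈ (["\\", "\""] : List String) then nl ++ "\\" ++ String.singleton letter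
          else nl ++ String.singleton letter) ""
      let newline := "\"" ++ newline ++ "\""
      dictAddEnc d (PySem.Str.len newline - 1)) d
    = lines.foldl (fun d line =>
        dictAddEnc d (1 + PySem.Str.len line + (PySem.Str.count line "\\" : Int)
                        + (PySem.Str.count line "\"" : Int))) d := by
  intro lines
  induction lines with
  | nil => intro d; rfl
  | cons x t ih =>
    intro d
    simp only [List.foldl_cons]
    rw [delta_eq x, ih]

theorem strenc_spec : Claim_equal_strenc := by
  intro l _ _
  unfold Spec_strenc strenc strenc_alt
  exact Prod.ext rfl (folds_eq l.1 l.2)
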